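-- pv_equiv track=rewrite | github.com/jcobol/ImageBBS | src/imagebbs/disk_image.py | _track_sector_to_offset
-- ===== SOURCE A (Python) =====
-- from typing import Dict, Iterable, Iterator, List, Optional
--
-- _SECTOR_COUNT: Dict[int, int] = {
--     **{track: 21 for track in range(1, 18)},
--     **{track: 19 for track in range(18, 25)},
--     **{track: 18 for track in range(25, 31)},
--     **{track: 17 for track in range(31, 36)},
-- }
--
-- _SECTOR_BYTES = 256
--
-- def _track_sector_to_offset(track: int, sector: int) -> int:
--     if track not in _SECTOR_COUNT:
--         raise ValueError(f"unsupported track {track}")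
--     if sector >= _SECTOR_COUNT[track]:
--         raise ValueError(f"sector {sector} out of range for track {track}")
--
--     offset = 0
--     for current_track in range(1, track):
--         offset += _SECTOR_COUNT[current_track] * _SECTOR_BYTES
--     return offset + sector * _SECTOR_BYTES
-- ===== SOURCE B (Python) =====
-- def _track_sector_to_offset(track: int, sector: int) -> int:
--     if not (1 <= track <= 35):
--         raise ValueError(f"unsupported track {track}")
--     counts = 21 if track < 18 else 19 if track < 25 else 18 if track < 31 else 17
--     if sector >= counts:
--         raise ValueError(f"sector {sector} out of range for track {track}")
--     prior = track - 1
--     full = (min(prior, 17) * 21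
--             + max(0, min(prior - 17, 7)) * 19
--             + max(0, min(prior - 24, 6)) * 18
--             + max(0, min(prior - 30, 5)) * 17)
--     return (full + sector) * 256
-- ===== Notes on version B (the rewrite author's own statement) =====
-- stated objective: simpler
-- what changed: Replaces the per-track accumulation loop (and the range-built dict) with a closed-form band-by-band arithmetic expression computed in constant time.
import Mathlib
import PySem

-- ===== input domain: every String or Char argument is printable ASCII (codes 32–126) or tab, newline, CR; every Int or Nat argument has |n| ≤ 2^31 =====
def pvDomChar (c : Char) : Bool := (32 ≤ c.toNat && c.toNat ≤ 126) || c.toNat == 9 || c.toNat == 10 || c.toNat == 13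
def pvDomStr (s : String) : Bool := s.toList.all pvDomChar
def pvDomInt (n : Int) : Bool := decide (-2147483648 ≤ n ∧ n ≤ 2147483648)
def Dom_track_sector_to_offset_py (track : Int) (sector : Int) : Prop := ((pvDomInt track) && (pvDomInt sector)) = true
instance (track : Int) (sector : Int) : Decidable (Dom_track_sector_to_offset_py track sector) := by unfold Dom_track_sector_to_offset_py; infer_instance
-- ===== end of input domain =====

-- B replaces A's per-track accumulation loop with a closed-form band-by-band arithmetic expression (simpler, constant-time).


-- ===== PORT A =====
-- _SECTOR_COUNT[t] for t in 1..35 (exact on the keys the dict holds; lookups outside raise and are excluded by Pre_)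
def sectorCountA (t : Int) : Int :=
  if t < 18 then 21 else if t < 25 then 19 else if t < 31 then 18 else 17

def track_sector_to_offset_py (track : Int) (sector : Int) : Int :=
  -- guards raise outside Pre_; loop 'for current_track in range(1, track)'
  ((PySem.List.pyRange 1 track 1).foldl (fun off t => off + sectorCountA t * 256) 0) + sector * 256

-- ===== PORT B =====
def track_sector_to_offset_py_alt (track : Int) (sector : Int) : Int :=
  let prior := track - 1
  let full := min prior 17 * 21 + max 0 (min (prior - 17) 7) * 19
              + max 0 (min (prior - 24) 6) * 18 + max 0 (min (prior - 30) 5) * 17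
  (full + sector) * 256

-- ===== PRECONDITION & SPEC =====
-- Pre_ excludes exactly the inputs where A raises ValueError: track outside 1..35, or sector ≥ that track's sector count.
def Pre_track_sector_to_offset_py (track : Int) (sector : Int) : Prop :=
  1 ≤ track ∧ track ≤ 35 ∧
  sector < (if track < 18 then 21 else if track < 25 then 19 else if track < 31 then 18 else 17)
instance (track : Int) (sector : Int) : Decidable (Pre_track_sector_to_offset_py track sector) := by
  unfold Pre_track_sector_to_offset_py; infer_instance
def pvWitness_track_sector_to_offset_py : Int × Int := (19, 4)

def Spec_track_sector_to_offset_py (track : Int) (sector : Int) (out : Int) : Prop := out = track_sector_to_offset_py_alt track sector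
instance (track : Int) (sector : Int) (out : Int) : Decidable (Spec_track_sector_to_offset_py track sector out) := by unfold Spec_track_sector_to_offset_py; infer_instance

-- ===== CLAIM (what is proved, stated in full; the proofs are below) =====
def Claim_equal_track_sector_to_offset_py : Prop := ∀ (track : Int) (sector : Int), Dom_track_sector_to_offset_py track sector → Pre_track_sector_to_offset_py track sector → Spec_track_sector_to_offset_py track sector (track_sector_to_offset_py track sector)

-- ===== LEMMAS AND PROOFS =====
-- A's accumulation loop equals B's closed form, for every supported track (finite case check)
theorem loopA_closed (t : Int) (h1 : 1 ≤ t) (h2 : t ≤ 35) :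
    ((PySem.List.pyRange 1 t 1).foldl (fun off u => off + sectorCountA u * 256) 0)
      = (min (t - 1) 17 * 21 + max 0 (min (t - 1 - 17) 7) * 19
         + max 0 (min (t - 1 - 24) 6) * 18 + max 0 (min (t - 1 - 30) 5) * 17) * 256 := by
  interval_cases t <;> decide

-- ===== VERDICT (by name: the statement is the Claim_ definition above) =====
theorem track_sector_to_offset_py_spec : Claim_equal_track_sector_to_offset_py := by
  intro track sector _ hpre
  obtain ⟨h1, h2, _⟩ := hpre
  simp only [Spec_track_sector_to_offset_py, track_sector_to_offset_py, track_sector_to_offset_py_alt]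
  rw [loopA_closed track h1 h2]
  ring
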